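-- pv_equiv track=rewrite | github.com/pyannote/pyannote-audio | pyannote/audio/utils/balance.py | _get_tuples_matching_power
-- ===== SOURCE A (Python) =====
-- from typing import Any, Dict, Iterable, List, Text, Tuple, Union
--
-- def _get_tuples_matching_power(tuple1: Tuple, tuple2: Tuple) -> int:
--     """How much tuple1 matches tuple2. 0 = no match. 1=1 matching elt, etc
--     None elements are not counted but pass as matched.
--     e.g. (None,2,3,None) & (1,2,3,4) have a matching power of 2.
--     """
--     if tuple1 == tuple2:
--         return len(tuple1)
--
--     matching_elements: int = 0
--     for i in range(len(tuple1)):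
--         if tuple1[i] == tuple2[i]:
--             matching_elements += 1
--         elif tuple1[i] == None:
--             continue
--         else:
--             return 0
--     return matching_elements
-- ===== SOURCE B (Python) =====
-- def _get_tuples_matching_power(tuple1, tuple2):
--     """Two-pass reformulation: validate every position (equal or None wildcard)
--     with all(), then count the exact matches with sum(); no early-exit loop."""
--     n = len(tuple1)
--     if all(tuple1[i] == tuple2[i] or tuple1[i] is None for i in range(n)):
--         return sum(tuple1[i] == tuple2[i] for i in range(n))
--     return 0
-- ===== Notes on version B (the rewrite author's own statement) =====
-- stated objective: simpler
-- what changed: Replaces the single early-exit accumulator loop (plus the tuple-equality fast path) with two declarative index passes: an all() validity check followed by a sum() of exact matches.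
import Mathlib
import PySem

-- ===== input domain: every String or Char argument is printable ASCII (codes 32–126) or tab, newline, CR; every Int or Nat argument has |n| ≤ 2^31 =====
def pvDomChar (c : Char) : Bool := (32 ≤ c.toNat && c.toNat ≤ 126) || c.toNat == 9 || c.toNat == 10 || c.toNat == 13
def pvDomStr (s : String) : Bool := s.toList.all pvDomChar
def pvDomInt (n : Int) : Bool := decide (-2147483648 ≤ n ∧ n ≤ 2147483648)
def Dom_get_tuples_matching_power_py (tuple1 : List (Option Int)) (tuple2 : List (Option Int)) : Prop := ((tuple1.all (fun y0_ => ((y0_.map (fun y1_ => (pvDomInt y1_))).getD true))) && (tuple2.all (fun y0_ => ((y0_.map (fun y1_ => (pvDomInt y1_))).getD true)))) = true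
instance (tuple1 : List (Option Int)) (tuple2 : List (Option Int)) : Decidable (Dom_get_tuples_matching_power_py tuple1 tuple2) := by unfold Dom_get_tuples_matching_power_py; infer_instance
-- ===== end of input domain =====

-- B replaces A's single early-exit accumulator loop (and its tuple-equality fast path)
-- with two declarative index passes: an all() validity check, then a count of exact matches.


-- ===== PORT A =====
-- A's for-loop over range(len(tuple1)) with early 'return 0' and accumulator;
-- tuple2[i] is PySem.List.pyGet? (none = IndexError, returns 0 here; such inputs are outside Pre_).
def pvLoopA (t1 t2 : List (Option Int)) (i : Nat) (acc : Int) : Int :=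
  if _h : i < t1.length then
    match PySem.List.pyGet? t2 (i : Int) with
    | none => 0  -- IndexError in Python; excluded by Pre_
    | some v =>
      if t1.getD i none = v then pvLoopA t1 t2 (i + 1) (acc + 1)
      else if t1.getD i none = none then pvLoopA t1 t2 (i + 1) acc
      else 0
  else acc
termination_by t1.length - i

def get_tuples_matching_power_py (tuple1 : List (Option Int)) (tuple2 : List (Option Int)) : Int :=
  if tuple1 = tuple2 then (tuple1.length : Int)
  else pvLoopA tuple1 tuple2 0 0

-- ===== PORT B =====
-- two passes over range(n): validity check with all(), then count of exact matches.
def get_tuples_matching_power_py_alt (tuple1 : List (Option Int)) (tuple2 : List (Option Int)) : Int :=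
  let n := tuple1.length
  if (List.range n).all
      (fun i => tuple1.getD i none == tuple2.getD i none || tuple1.getD i none == none) then
    (((List.range n).countP (fun i => tuple1.getD i none == tuple2.getD i none) : Nat) : Int)
  else 0

-- ===== PRECONDITION & SPEC =====
-- Pre_ excludes exactly the inputs where Python A raises IndexError (tuple2 shorter than
-- tuple1 with every position up to len(tuple2) matching-or-None); B raises there too.
def Pre_get_tuples_matching_power_py (tuple1 : List (Option Int)) (tuple2 : List (Option Int)) : Prop :=
  tuple1.length ≤ tuple2.length ∨
    ((List.range tuple2.length).all
      (fun j => tuple1.getD j none == tuple2.getD j none || tuple1.getD j none == none)) = false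
instance (tuple1 : List (Option Int)) (tuple2 : List (Option Int)) : Decidable (Pre_get_tuples_matching_power_py tuple1 tuple2) := by unfold Pre_get_tuples_matching_power_py; infer_instance

def pvWitness_get_tuples_matching_power_py : List (Option Int) × List (Option Int) :=
  ([none, some 2, some 3], [some 1, some 2, some 3])

def Spec_get_tuples_matching_power_py (tuple1 : List (Option Int)) (tuple2 : List (Option Int)) (out : Int) : Prop := out = get_tuples_matching_power_py_alt tuple1 tuple2
instance (tuple1 : List (Option Int)) (tuple2 : List (Option Int)) (out : Int) : Decidable (Spec_get_tuples_matching_power_py tuple1 tuple2 out) := by unfold Spec_get_tuples_matching_power_py; infer_instance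

-- ===== CLAIM (what is proved, stated in full; the proofs are below) =====
def Claim_equal_get_tuples_matching_power_py : Prop := ∀ (tuple1 : List (Option Int)) (tuple2 : List (Option Int)), Dom_get_tuples_matching_power_py tuple1 tuple2 → Pre_get_tuples_matching_power_py tuple1 tuple2 → Spec_get_tuples_matching_power_py tuple1 tuple2 (get_tuples_matching_power_py tuple1 tuple2)

-- ===== LEMMAS AND PROOFS =====

-- the per-index predicates of B (and of the loop invariant)
def pvValid (t1 t2 : List (Option Int)) (j : Nat) : Bool :=
  t1.getD j none == t2.getD j none || t1.getD j none == none
def pvEq (t1 t2 : List (Option Int)) (j : Nat) : Bool :=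
  t1.getD j none == t2.getD j none

lemma pvAlt_eq (t1 t2 : List (Option Int)) :
    get_tuples_matching_power_py_alt t1 t2 =
      if (List.range t1.length).all (pvValid t1 t2) then
        (((List.range t1.length).countP (pvEq t1 t2) : Nat) : Int)
      else 0 := rfl

lemma pvLoop_step (t1 t2 : List (Option Int)) (i : Nat) (acc : Int) (v : Option Int) :
    (match some v with
      | none => (0 : Int)
      | some w =>
        if t1.getD i none = w then pvLoopA t1 t2 (i + 1) (acc + 1)
        else if t1.getD i none = none then pvLoopA t1 t2 (i + 1) acc
        else 0) =
      if t1.getD i none = v then pvLoopA t1 t2 (i + 1) (acc + 1)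
      else if t1.getD i none = none then pvLoopA t1 t2 (i + 1) acc
      else 0 := rfl

lemma pvLoopA_char (t1 t2 : List (Option Int)) (hlen : t1.length ≤ t2.length) :
    ∀ (k i : Nat) (acc : Int), i + k = t1.length →
      pvLoopA t1 t2 i acc =
        if (List.range' i k).all (pvValid t1 t2) then
          acc + ((List.range' i k).countP (pvEq t1 t2) : Int)
        else 0 := by
  intro k
  induction k with
  | zero =>
    intro i acc hi
    have hnotlt : ¬ i < t1.length := by omega
    rw [pvLoopA, dif_neg hnotlt]
    simp [List.range']
  | succ k ih =>
    intro i acc hi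
    have hi1 : i < t1.length := by omega
    have hi2 : i < t2.length := lt_of_lt_of_le hi1 hlen
    rw [pvLoopA, dif_pos hi1, PySem.List.pyGet?_natCast, List.getElem?_eq_getElem hi2,
      pvLoop_step]
    have hg2 : t2.getD i none = t2[i] := List.getD_eq_getElem t2 none hi2
    rw [List.range'_succ, List.all_cons, List.countP_cons]
    by_cases he : t1.getD i none = t2[i]
    · rw [if_pos he]
      have hv : pvValid t1 t2 i = true := by rw [pvValid, hg2, he]; simp
      have hc : pvEq t1 t2 i = true := by rw [pvEq, hg2, he]; simp
      rw [ih (i + 1) (acc + 1) (by omega), hv, hc]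
      by_cases hall : (List.range' (i + 1) k).all (pvValid t1 t2) = true
      · simp [hall]; ring
      · simp [hall]
    · rw [if_neg he]
      by_cases hn : t1.getD i none = none
      · rw [if_pos hn]
        have hv : pvValid t1 t2 i = true := by rw [pvValid, hn]; simp
        have hc : pvEq t1 t2 i = false := by
          rw [pvEq, hg2]; exact beq_eq_false_iff_ne.mpr he
        rw [ih (i + 1) acc (by omega), hv, hc]
        by_cases hall : (List.range' (i + 1) k).all (pvValid t1 t2) = true
        · simp [hall]
        · simp [hall]
      · rw [if_neg hn]
        have e1 : (t1.getD i none == t2[i]) = false := beq_eq_false_iff_ne.mpr he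
        have e2 : (t1.getD i none == (none : Option Int)) = false := beq_eq_false_iff_ne.mpr hn
        have hv : pvValid t1 t2 i = false := by rw [pvValid, hg2, e1, e2]; rfl
        simp [hv]

lemma pvLoopA_zero (t1 t2 : List (Option Int)) :
    ∀ (k i : Nat) (acc : Int), i + k = t1.length →
      (∃ j, i ≤ j ∧ j < t2.length ∧ j < t1.length ∧ pvValid t1 t2 j = false) →
      pvLoopA t1 t2 i acc = 0 := by
  intro k
  induction k with
  | zero =>
    rintro i acc hi ⟨j, hij, hj2, hj1, hjv⟩
    omega
  | succ k ih =>
    rintro i acc hi ⟨j, hij, hj2, hj1, hjv⟩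
    have hi1 : i < t1.length := by omega
    have hi2 : i < t2.length := by omega
    rw [pvLoopA, dif_pos hi1, PySem.List.pyGet?_natCast, List.getElem?_eq_getElem hi2,
      pvLoop_step]
    have hg2 : t2.getD i none = t2[i] := List.getD_eq_getElem t2 none hi2
    by_cases hvi : pvValid t1 t2 i = true
    · have hne : i ≠ j := by intro h; rw [h] at hvi; simp [hvi] at hjv
      have hwit : ∃ j, i + 1 ≤ j ∧ j < t2.length ∧ j < t1.length ∧ pvValid t1 t2 j = false :=
        ⟨j, by omega, hj2, hj1, hjv⟩
      by_cases he : t1.getD i none = t2[i]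
      · rw [if_pos he]; exact ih (i + 1) (acc + 1) (by omega) hwit
      · rw [if_neg he]
        have hn : t1.getD i none = none := by
          rw [pvValid, hg2] at hvi
          rcases Bool.or_eq_true_iff.mp hvi with h' | h'
          · exact absurd (eq_of_beq h') he
          · exact eq_of_beq h'
        rw [if_pos hn]; exact ih (i + 1) acc (by omega) hwit
    · rw [pvValid, hg2] at hvi
      simp only [Bool.or_eq_true, beq_iff_eq] at hvi
      push Not at hvi
      rw [if_neg hvi.1, if_neg hvi.2]

-- ===== VERDICT (by name: the statement is the Claim_ definition above) =====
theorem get_tuples_matching_power_py_spec : Claim_equal_get_tuples_matching_power_py := by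
  intro t1 t2 _hdom hpre
  unfold Spec_get_tuples_matching_power_py get_tuples_matching_power_py
  rw [pvAlt_eq]
  by_cases heq : t1 = t2
  · subst heq
    rw [if_pos rfl]
    have hall : (List.range t1.length).all (pvValid t1 t1) = true := by
      simp [pvValid]
    rw [if_pos hall]
    have : (List.range t1.length).countP (pvEq t1 t1) = t1.length := by
      rw [List.countP_eq_length.mpr (by simp [pvEq]), List.length_range]
    rw [this]
  · rw [if_neg heq]
    by_cases hlen : t1.length ≤ t2.length
    · rw [pvLoopA_char t1 t2 hlen t1.length 0 0 (by omega), List.range_eq_range']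
      by_cases hall : (List.range' 0 t1.length).all (pvValid t1 t2) = true
      · rw [if_pos hall, if_pos hall]; ring
      · rw [if_neg hall, if_neg hall]
    · have hpre' : ((List.range t2.length).all (pvValid t1 t2)) = false := by
        rcases hpre with h | h
        · exact absurd h hlen
        · exact h
      have hex : ∃ j, j < t2.length ∧ pvValid t1 t2 j = false := by
        rcases List.all_eq_false.mp hpre' with ⟨j, hjmem, hjv⟩
        exact ⟨j, List.mem_range.mp hjmem, Bool.eq_false_iff.mpr hjv⟩
      obtain ⟨j, hj2, hjv⟩ := hex
      have hjn : j < t1.length := by omega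
      rw [pvLoopA_zero t1 t2 t1.length 0 0 (by omega) ⟨j, Nat.zero_le j, hj2, hjn, hjv⟩]
      have hall : (List.range t1.length).all (pvValid t1 t2) = false :=
        List.all_eq_false.mpr ⟨j, List.mem_range.mpr hjn, Bool.eq_false_iff.mp hjv⟩
      rw [hall]
      simp
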